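-- pv_equiv track=rewrite | github.com/wan-elmus/Algos | Q3.py | build_service_facility
-- ===== SOURCE A (Python) =====
-- def build_service_facility(n, m, costs, flights):
--     selected_sites = set()
--     unserved_flights = set()
--
--     for flight in flights:
--         unserved_flights.add(flight[0])
--         unserved_flights.add(flight[1])
--
--     sorted_sites = sorted(range(n), key=lambda i: costs[i])
--
--     for site in sorted_sites:
--         if not unserved_flights:
--             break
--
--         site_covers_flight = False
--
--         for flight in flights:
--             if flight[0] == site or flight[1] == site:
--                 site_covers_flight = True
--                 unserved_flights.discard(flight[0])
--                 unserved_flights.discard(flight[1])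
--
--         if site_covers_flight:
--             selected_sites.add(site)
--
--     return selected_sites
-- ===== SOURCE B (Python) =====
-- def build_service_facility(n, m, costs, flights):
--     # Precompute, in one pass over the flights, the set of endpoints and,
--     # for each endpoint site, the set of endpoints discarded when that site
--     # is picked; then a single sorted scan over the sites needs no flight scan.
--     endpoints = set()
--     discards = {}
--     for flight in flights:
--         a, b = flight[0], flight[1]
--         endpoints.add(a)
--         endpoints.add(b)
--         discards.setdefault(a, set()).update((a, b))
--         discards.setdefault(b, set()).update((a, b))
--     selected = set()
--     remaining = endpoints
--     for site in sorted(range(n), key=lambda i: costs[i]):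
--         if not remaining:
--             break
--         if site in discards:
--             selected.add(site)
--             remaining -= discards[site]
--     return selected
-- ===== Notes on version B (the rewrite author's own statement) =====
-- stated objective: faster
-- what changed: Instead of rescanning the whole flight list for every candidate site, B builds in one pass over the flights a dict mapping each endpoint site to the set of endpoints it discards, then does a single sorted scan with O(1) dict lookups and set differences.
import Mathlib
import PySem

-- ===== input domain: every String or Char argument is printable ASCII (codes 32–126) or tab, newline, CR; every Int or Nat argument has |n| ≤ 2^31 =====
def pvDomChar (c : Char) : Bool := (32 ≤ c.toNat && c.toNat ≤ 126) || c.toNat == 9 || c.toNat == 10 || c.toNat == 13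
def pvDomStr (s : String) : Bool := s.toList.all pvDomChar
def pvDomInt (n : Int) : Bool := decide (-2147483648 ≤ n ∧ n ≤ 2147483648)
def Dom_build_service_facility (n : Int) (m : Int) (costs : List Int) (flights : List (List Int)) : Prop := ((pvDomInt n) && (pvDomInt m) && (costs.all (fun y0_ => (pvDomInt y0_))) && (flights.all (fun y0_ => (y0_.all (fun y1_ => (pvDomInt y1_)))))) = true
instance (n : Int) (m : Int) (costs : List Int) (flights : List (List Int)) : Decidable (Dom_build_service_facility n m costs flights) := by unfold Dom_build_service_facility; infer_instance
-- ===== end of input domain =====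

-- B replaces A's per-site rescan of the whole flight list by a one-pass precomputed
-- dict (endpoint site ↦ set of endpoints it discards) and a single sorted scan (faster).

-- ===== PORT A =====
-- flight[i] (Pre_ guarantees the index is in range; getD 0 is dead there)
def pvFlightGet (f : List Int) (i : Int) : Int := (PySem.List.pyGet? f i).getD 0

-- flight[0] == site or flight[1] == site
def pvMatch (site : Int) (f : List Int) : Bool := pvFlightGet f 0 == site || pvFlightGet f 1 == site

-- the body of A's inner 'for flight in flights' loop (state: site_covers_flight, unserved_flights)
def pvA_matchStep (site : Int) (st : Bool × PySem.Set Int) (f : List Int) : Bool × PySem.Set Int :=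
  if pvMatch site f then
    (true, PySem.Set.discard (PySem.Set.discard st.2 (pvFlightGet f 0)) (pvFlightGet f 1))
  else st

-- A's 'for site in sorted_sites' loop with its break
def pvA_loop (flights : List (List Int)) : List Int → PySem.Set Int → PySem.Set Int → PySem.Set Int
  | [], sel, _ => sel
  | site :: rest, sel, uns =>
    if uns.isEmpty then sel
    else
      let r := flights.foldl (pvA_matchStep site) (false, uns)
      pvA_loop flights rest (if r.1 then PySem.Set.add sel site else sel) r.2

def build_service_facility (n : Int) (m : Int) (costs : List Int) (flights : List (List Int)) : List Int :=
  let unserved := flights.foldl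
    (fun u f => PySem.Set.add (PySem.Set.add u (pvFlightGet f 0)) (pvFlightGet f 1)) PySem.Set.empty
  let sorted_sites := PySem.List.sorted (PySem.List.pyRange 0 n 1)
    (fun i => (PySem.List.pyGet? costs i).getD 0) false
  pvA_loop flights sorted_sites PySem.Set.empty unserved

-- ===== PORT B =====
-- endpoints.add(flight[0]); endpoints.add(flight[1])
def pvB_epStep (eps : PySem.Set Int) (f : List Int) : PySem.Set Int :=
  PySem.Set.add (PySem.Set.add eps (pvFlightGet f 0)) (pvFlightGet f 1)

-- discards.setdefault(a, set()).update((a, b)) for a = flight[0] and then for flight[1]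
def pvB_discStep (d : PySem.Dict Int (PySem.Set Int)) (f : List Int) : PySem.Dict Int (PySem.Set Int) :=
  (d.modify (pvFlightGet f 0) PySem.Set.empty
      (fun s => PySem.Set.update s [pvFlightGet f 0, pvFlightGet f 1])).modify (pvFlightGet f 1)
      PySem.Set.empty (fun s => PySem.Set.update s [pvFlightGet f 0, pvFlightGet f 1])

-- B's single pass over flights building (endpoints, discards)
def pvB_prep (flights : List (List Int)) : PySem.Set Int × PySem.Dict Int (PySem.Set Int) :=
  flights.foldl (fun st f => (pvB_epStep st.1 f, pvB_discStep st.2 f))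
    (PySem.Set.empty, PySem.Dict.empty)

-- B's sorted scan: dict lookup instead of a flight scan
def pvB_loop (disc : PySem.Dict Int (PySem.Set Int)) :
    List Int → PySem.Set Int → PySem.Set Int → PySem.Set Int
  | [], sel, _ => sel
  | site :: rest, sel, rem =>
    if rem.isEmpty then sel
    else
      match disc.get? site with
      | some ds => pvB_loop disc rest (PySem.Set.add sel site) (PySem.Set.diff rem ds)
      | none => pvB_loop disc rest sel rem

def build_service_facility_alt (n : Int) (m : Int) (costs : List Int) (flights : List (List Int)) : List Int :=
  let p := pvB_prep flights
  pvB_loop p.2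
    (PySem.List.sorted (PySem.List.pyRange 0 n 1) (fun i => (PySem.List.pyGet? costs i).getD 0) false)
    PySem.Set.empty p.1

-- ===== PRECONDITION & SPEC =====
-- Pre_ excludes exactly the inputs where Python A raises IndexError: a flight row with
-- fewer than two entries, or n exceeding len(costs) (the sort key costs[i] is read for every i < n).
def Pre_build_service_facility (n : Int) (m : Int) (costs : List Int) (flights : List (List Int)) : Prop :=
  n ≤ (costs.length : Int) ∧ ∀ f ∈ flights, 2 ≤ f.length
instance (n : Int) (m : Int) (costs : List Int) (flights : List (List Int)) : Decidable (Pre_build_service_facility n m costs flights) := by unfold Pre_build_service_facility; infer_instance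

def pvWitness_build_service_facility : Int × Int × List Int × List (List Int) :=
  (2, 1, [3, 1], [[0, 1]])

def Spec_build_service_facility (n : Int) (m : Int) (costs : List Int) (flights : List (List Int)) (out : List Int) : Prop := out = build_service_facility_alt n m costs flights
instance (n : Int) (m : Int) (costs : List Int) (flights : List (List Int)) (out : List Int) : Decidable (Spec_build_service_facility n m costs flights out) := by unfold Spec_build_service_facility; infer_instance

-- ===== CLAIM (what is proved, stated in full; the proofs are below) =====
def Claim_equal_build_service_facility : Prop := ∀ (n : Int) (m : Int) (costs : List Int) (flights : List (List Int)), Dom_build_service_facility n m costs flights → Pre_build_service_facility n m costs flights → Spec_build_service_facility n m costs flights (build_service_facility n m costs flights)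

-- ===== LEMMAS AND PROOFS =====

-- A's inner loop over flights = (does any flight touch the site?,
--   unserved filtered of the endpoints of the flights touching the site)
lemma pvA_inner_eq (site : Int) (flights : List (List Int)) (b : Bool) (uns : PySem.Set Int) :
    flights.foldl (pvA_matchStep site) (b, uns) =
      (b || flights.any (pvMatch site),
       uns.filter (fun x => !(flights.any (fun f =>
         pvMatch site f && (pvFlightGet f 0 == x || pvFlightGet f 1 == x))))) := by
  induction flights generalizing b uns with
  | nil => simp
  | cons f rest ih =>
    simp only [List.foldl_cons, List.any_cons]
    by_cases h : pvMatch site f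
    · rw [show pvA_matchStep site (b, uns) f =
        (true, PySem.Set.discard (PySem.Set.discard uns (pvFlightGet f 0)) (pvFlightGet f 1)) by
          simp [pvA_matchStep, h]]
      rw [ih]
      simp only [h, Bool.true_or, Bool.or_true, PySem.Set.discard, List.filter_filter]
      refine Prod.ext rfl ?_
      refine List.filter_congr ?_
      intro x _
      by_cases hxa : pvFlightGet f 0 = x <;> by_cases hxb : pvFlightGet f 1 = x <;>
        simp [hxa, hxb, BEq.comm, Bool.and_comm]
    · rw [show pvA_matchStep site (b, uns) f = (b, uns) by simp [pvA_matchStep, h]]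
      rw [ih]
      simp only [h]
      refine Prod.ext (by simp) ?_
      refine List.filter_congr ?_
      intro x _
      simp

-- membership in the discard set accumulated for key k
lemma pvB_disc_mem (flights : List (List Int)) (d : PySem.Dict Int (PySem.Set Int)) (k x : Int) :
    (x ∈ (flights.foldl pvB_discStep d).getD k PySem.Set.empty) ↔
      (x ∈ d.getD k PySem.Set.empty ∨ ∃ f ∈ flights,
        (pvFlightGet f 0 = k ∨ pvFlightGet f 1 = k) ∧ (pvFlightGet f 0 = x ∨ pvFlightGet f 1 = x)) := by
  induction flights generalizing d with
  | nil => simp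
  | cons f rest ih =>
    simp only [List.foldl_cons, ih, List.mem_cons]
    simp only [pvB_discStep, PySem.Dict.getD_modify]
    split_ifs <;>
      (try simp only [PySem.Set.mem_update, List.mem_cons, List.not_mem_nil, or_false]) <;>
      aesop

-- key presence in the discard dict = some flight touches k
lemma pvB_disc_contains (flights : List (List Int)) (d : PySem.Dict Int (PySem.Set Int)) (k : Int) :
    (flights.foldl pvB_discStep d).contains k =
      (d.contains k || flights.any (fun f => pvFlightGet f 0 == k || pvFlightGet f 1 == k)) := by
  induction flights generalizing d with
  | nil => simp
  | cons f rest ih =>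
    simp only [List.foldl_cons, ih, List.any_cons]
    rw [pvB_discStep]
    simp only [PySem.Dict.contains_modify]
    by_cases h1 : pvFlightGet f 0 = k <;> by_cases h2 : pvFlightGet f 1 = k <;>
      simp [h1, h2, BEq.comm, Bool.or_comm, Bool.or_left_comm, Bool.or_assoc]

-- the two scans agree site by site
lemma pv_loop_eq (flights : List (List Int)) (sites : List Int) (sel uns : PySem.Set Int) :
    pvA_loop flights sites sel uns =
      pvB_loop (flights.foldl pvB_discStep PySem.Dict.empty) sites sel uns := by
  induction sites generalizing sel uns with
  | nil => rfl
  | cons site rest ih =>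
    rw [pvA_loop, pvB_loop]
    by_cases he : uns.isEmpty
    · rw [if_pos he, if_pos he]
    · rw [if_neg he, if_neg he]
      have hc : (flights.foldl pvB_discStep PySem.Dict.empty).contains site
          = flights.any (pvMatch site) := by
        rw [pvB_disc_contains]
        simp only [PySem.Dict.contains_empty, Bool.false_or]
        rfl
      by_cases hm : flights.any (pvMatch site) = true
      · have hcon : (flights.foldl pvB_discStep PySem.Dict.empty).contains site = true := by
          rw [hc, hm]
        rw [PySem.Dict.contains_eq_isSome_get?] at hcon
        obtain ⟨ds, hds⟩ := Option.isSome_iff_exists.mp hcon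
        have hgetD : (flights.foldl pvB_discStep PySem.Dict.empty).getD site PySem.Set.empty = ds := by
          rw [PySem.Dict.getD_eq_get?_getD, hds]; rfl
        rw [hds]
        simp only [pvA_inner_eq, hm, Bool.false_or, if_true]
        rw [ih]
        congr 1
        rw [PySem.Set.diff]
        refine List.filter_congr ?_
        intro x _
        have hds_mem : ds.contains x = flights.any (fun f =>
            pvMatch site f && (pvFlightGet f 0 == x || pvFlightGet f 1 == x)) := by
          rw [Bool.eq_iff_iff]
          rw [PySem.Set.contains_iff, ← hgetD, pvB_disc_mem]
          simp [pvMatch, List.any_eq_true]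
        rw [hds_mem]
      · have hcon : (flights.foldl pvB_discStep PySem.Dict.empty).contains site = false := by
          rw [hc]; exact Bool.not_eq_true _ ▸ (by simpa using hm)
        have hnone : (flights.foldl pvB_discStep PySem.Dict.empty).get? site = none := by
          rw [PySem.Dict.contains_eq_isSome_get?] at hcon
          exact Option.not_isSome_iff_eq_none.mp (by simp [hcon])
        rw [hnone]
        simp only [pvA_inner_eq, hm, Bool.false_or]
        have hfilter : uns.filter (fun x => !(flights.any (fun f =>
            pvMatch site f && (pvFlightGet f 0 == x || pvFlightGet f 1 == x)))) = uns := by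
          apply List.filter_eq_self.mpr
          intro x _
          have := List.any_eq_false.mp (Bool.not_eq_true _ ▸ (by simpa using hm) : flights.any (pvMatch site) = false)
          simp only [Bool.not_eq_true']
          apply List.any_eq_false.mpr
          intro f hf
          simp [this f hf]
        rw [hfilter]
        exact ih sel uns

-- ===== VERDICT (by name: the statement is the Claim_ definition above) =====
theorem build_service_facility_spec : Claim_equal_build_service_facility := by
  intro n m costs flights _ _
  unfold Spec_build_service_facility build_service_facility build_service_facility_alt pvB_prep
  rw [PySem.List.foldl_prod_mk (f := pvB_epStep) (g := pvB_discStep)]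
  exact pv_loop_eq flights _ _ _
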